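-- pv_equiv track=rewrite | github.com/TeeEye/title2title | title_normalize.py | normalize_space
-- ===== SOURCE A (Python) =====
-- def isletter(s):
--     if 'a' <= s <= 'z':
--         return True
--     if 'A' <= s <= 'Z':
--         return True
--     return False
--
-- def normalize_space(title):
--     if title.find(" ") < 0:
--         return title
--     # title = re.sub("\s{2,}", " ", title)
--     new_title = []
--     last_english = False
--     idx = 0
--     while idx < len(title):
--         s = title[idx]
--         next_english = False
--         if idx + 1 < len(title):
--             next_english = isletter(title[idx + 1])
--         if s == " " and last_english and next_english:
--             new_title.append(s)
--             last_english = False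
--             idx += 1
--             continue
--         if s != " ":
--             new_title.append(s)
--         last_english = isletter(s)
--         idx += 1
--     return "".join(new_title)
-- ===== SOURCE B (Python) =====
-- def normalize_space(title):
--     def letter(c):
--         return 'a' <= c <= 'z' or 'A' <= c <= 'Z'
--     parts = title.split(' ')
--     res = [parts[0]]
--     for prev, p in zip(parts, parts[1:]):
--         if prev and letter(prev[-1]) and p and letter(p[0]):
--             res.append(' ')
--         res.append(p)
--     return ''.join(res)
-- ===== Notes on version B (the rewrite author's own statement) =====
-- stated objective: alternative
-- what changed: A's character-by-character index loop with a last_english flag and continue is replaced by tokenization: split the title on single spaces into pieces (empty pieces kept), then rejoin adjacent pieces with a space only when the left piece ends with an ASCII letter and the right piece starts with one.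
import Mathlib
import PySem

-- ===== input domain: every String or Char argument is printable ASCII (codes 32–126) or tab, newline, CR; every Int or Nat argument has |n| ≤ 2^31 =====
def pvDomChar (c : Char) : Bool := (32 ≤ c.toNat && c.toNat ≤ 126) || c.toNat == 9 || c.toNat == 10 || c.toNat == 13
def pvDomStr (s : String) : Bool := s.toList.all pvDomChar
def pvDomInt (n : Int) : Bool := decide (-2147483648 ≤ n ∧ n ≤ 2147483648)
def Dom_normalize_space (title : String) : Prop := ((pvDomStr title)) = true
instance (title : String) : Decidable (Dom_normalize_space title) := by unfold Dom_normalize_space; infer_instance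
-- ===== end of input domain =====

-- B replaces A's character-by-character flag loop by split-on-space tokenization plus a
-- rejoin of adjacent tokens (space kept iff left token ends and right token starts with
-- an ASCII letter); same O(n) cost (objective: alternative).

-- ===== PORT A =====
-- isletter(s): A's if-chain, literally
def pvIsletter (s : Char) : Bool :=
  if 'a' ≤ s ∧ s ≤ 'z' then true
  else if 'A' ≤ s ∧ s ≤ 'Z' then true
  else false

-- A's while loop; state = (characters from idx on, last_english); title[idx+1] is the head of the tail
def pvLoopA (last_english : Bool) : List Char → List Char
  | [] => []
  | s :: rest =>
    let next_english : Bool := match rest with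
      | [] => false
      | t :: _ => pvIsletter t
    if s == ' ' && last_english && next_english then
      s :: pvLoopA false rest
    else if s != ' ' then
      s :: pvLoopA (pvIsletter s) rest
    else
      pvLoopA (pvIsletter s) rest

def normalize_space (title : String) : String :=
  if PySem.Str.find title " " < 0 then title
  else String.ofList (pvLoopA false title.toList)

-- ===== PORT B =====
-- letter(c): 'a' <= c <= 'z' or 'A' <= c <= 'Z'
def pvLetter (c : Char) : Bool := ('a' ≤ c && c ≤ 'z') || ('A' ≤ c && c ≤ 'Z')

-- 'prev and letter(prev[-1]) and p and letter(p[0])'; prev[-1] / p[0] via pyGet?, whose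
-- none case (empty string) is cut off by the truthiness guards exactly as in Python
def pvOk (prev p : String) : Bool :=
  prev != "" && (match PySem.Str.pyGet? prev (-1) with | some c => pvLetter c | none => false)
    && (p != "" && (match PySem.Str.pyGet? p 0 with | some c => pvLetter c | none => false))

-- the loop body: maybe append ' ', then append the next token
def pvStepB (acc : List String) (pr : String × String) : List String :=
  (if pvOk pr.1 pr.2 then acc ++ [" "] else acc) ++ [pr.2]

def normalize_space_alt (title : String) : String :=
  let parts := (PySem.Str.split? title " ").getD []   -- title.split(' '); sep ≠ "" so split? = some …
  let res : List String :=
    (parts.zip (parts.drop 1)).foldl pvStepB [parts.headD ""]   -- parts[0]; split never returns []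
  PySem.Str.join "" res

-- ===== PRECONDITION & SPEC =====
def Spec_normalize_space (title : String) (out : String) : Prop := out = normalize_space_alt title
instance (title : String) (out : String) : Decidable (Spec_normalize_space title out) := by unfold Spec_normalize_space; infer_instance

-- ===== CLAIM (what is proved, stated in full; the proofs are below) =====
def Claim_equal_normalize_space : Prop := ∀ (title : String), Dom_normalize_space title → Spec_normalize_space title (normalize_space title)

-- ===== LEMMAS AND PROOFS =====

-- structural single-char split: what Python's title.split(' ') computes
def pvMySplit : List Char → List (List Char)
  | [] => [[]]
  | c :: cs =>
    if c = ' ' then [] :: pvMySplit cs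
    else match pvMySplit cs with
      | [] => [[c]]
      | t :: ts => (c :: t) :: ts

theorem pvMySplit_ne_nil (cs : List Char) : pvMySplit cs ≠ [] := by
  cases cs with
  | nil => simp [pvMySplit]
  | cons c cs =>
    unfold pvMySplit
    split_ifs
    · simp
    · cases pvMySplit cs <;> simp

def pvConsHead (p : List Char) : List (List Char) → List (List Char)
  | [] => [p]
  | t :: ts => (p ++ t) :: ts

theorem pvGo_spec : ∀ (fuel : Nat) (l cur : List Char) (acc : List (List Char)),
    l.length ≤ fuel →
    PySem.Chars.splitOn.go [' '] fuel l cur acc = acc.reverse ++ pvConsHead cur.reverse (pvMySplit l) := by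
  intro fuel
  induction fuel with
  | zero =>
    intro l cur acc h
    have : l = [] := List.length_eq_zero_iff.mp (Nat.le_zero.mp h)
    subst this
    simp [PySem.Chars.splitOn.go, pvMySplit, pvConsHead]
  | succ n ih =>
    intro l cur acc h
    cases l with
    | nil => simp [PySem.Chars.splitOn.go, pvMySplit, pvConsHead]
    | cons c rest =>
      by_cases hc : c = ' '
      · subst hc
        have hpre : ([' '] : List Char).isPrefixOf (' ' :: rest) = true := by
          simp [List.isPrefixOf]
        rw [show PySem.Chars.splitOn.go [' '] (n+1) (' ' :: rest) cur acc
              = PySem.Chars.splitOn.go [' '] n rest [] (cur.reverse :: acc) from by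
            simp [PySem.Chars.splitOn.go, hpre]]
        rw [ih rest [] (cur.reverse :: acc) (by simpa using Nat.lt_succ_iff.mp (by simpa using h))]
        obtain ⟨t, ts, ht⟩ := List.exists_cons_of_ne_nil (pvMySplit_ne_nil rest)
        rw [show pvMySplit (' ' :: rest) = [] :: pvMySplit rest from by simp [pvMySplit]]
        rw [ht]
        simp [pvConsHead]
      · have hpre : ([' '] : List Char).isPrefixOf (c :: rest) = false := by
          simp [List.isPrefixOf]
          exact fun h' => hc h'.symm
        rw [show PySem.Chars.splitOn.go [' '] (n+1) (c :: rest) cur acc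
              = PySem.Chars.splitOn.go [' '] n rest (c :: cur) acc from by
            simp [PySem.Chars.splitOn.go, hpre]]
        rw [ih rest (c :: cur) acc (by simpa using Nat.lt_succ_iff.mp (by simpa using h))]
        obtain ⟨t, ts, ht⟩ := List.exists_cons_of_ne_nil (pvMySplit_ne_nil rest)
        rw [show pvMySplit (c :: rest) = match pvMySplit rest with
              | [] => [[c]] | t :: ts => (c :: t) :: ts from by simp [pvMySplit, hc]]
        rw [ht]
        simp [pvConsHead]
  -- done

theorem pvSplitOn_eq (cs : List Char) : PySem.Chars.splitOn cs [' '] = pvMySplit cs := by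
  unfold PySem.Chars.splitOn
  rw [pvGo_spec (cs.length + 1) cs [] [] (by omega)]
  obtain ⟨t, ts, ht⟩ := List.exists_cons_of_ne_nil (pvMySplit_ne_nil cs)
  rw [ht]; simp [pvConsHead]

-- letter flags of a token's last / first character
def pvEndB (b : Bool) (t : List Char) : Bool :=
  match t.getLast? with | some c => pvLetter c | none => b
def pvHeadB (t : List Char) : Bool :=
  match t.head? with | some c => pvLetter c | none => false

-- the joined result, over the token list (first gap flag generalized to b)
def pvF (b : Bool) : List (List Char) → List Char
  | [] => []
  | [t] => t
  | t :: q :: rest => t ++ (if pvEndB b t && pvHeadB q then [' '] else []) ++ pvF false (q :: rest)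

-- B's loop, over the remaining tokens with the previous token carried along
def pvGo (prevL : List Char) : List (List Char) → List Char
  | [] => []
  | q :: qs => (if pvEndB false prevL && pvHeadB q then [' '] else []) ++ q ++ pvGo q qs

theorem pvLetter_eq (c : Char) : pvIsletter c = pvLetter c := by
  simp only [pvIsletter, pvLetter]
  split_ifs with h1 h2 <;> simp_all

theorem pvLoopA_cons (last : Bool) (s : Char) (rest : List Char) :
    pvLoopA last (s :: rest) =
      if s == ' ' && last && pvHeadB rest then s :: pvLoopA false rest
      else if s != ' ' then s :: pvLoopA (pvIsletter s) rest
      else pvLoopA (pvIsletter s) rest := by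
  cases rest <;> simp [pvLoopA, pvHeadB, pvLetter_eq]

theorem pvEndB_cons (b : Bool) (c : Char) (t : List Char) :
    pvEndB b (c :: t) = pvEndB (pvLetter c) t := by
  cases t with
  | nil => simp [pvEndB]
  | cons x xs =>
    simp only [pvEndB, List.getLast?_cons_cons]
    cases h : (x :: xs).getLast? with
    | none => simp at h
    | some d => rfl

theorem pvHeadB_mySplit (r : List Char) : pvHeadB ((pvMySplit r).headD []) = pvHeadB r := by
  cases r with
  | nil => simp [pvMySplit, pvHeadB]
  | cons d ds =>
    by_cases hd : d = ' '
    · subst hd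
      rw [show pvMySplit (' ' :: ds) = [] :: pvMySplit ds from by simp [pvMySplit]]
      simp [pvHeadB]
      decide
    · rw [show pvMySplit (d :: ds) = match pvMySplit ds with
            | [] => [[d]] | t :: ts => (d :: t) :: ts from by simp [pvMySplit, hd]]
      cases pvMySplit ds <;> simp [pvHeadB]

-- A's loop computes the tokenized join
theorem pvLoopA_eq_F : ∀ (cs : List Char) (b : Bool), pvLoopA b cs = pvF b (pvMySplit cs) := by
  intro cs
  induction cs with
  | nil => intro b; simp [pvLoopA, pvMySplit, pvF]
  | cons c r ih =>
    intro b
    rw [pvLoopA_cons]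
    obtain ⟨t, ts, ht⟩ := List.exists_cons_of_ne_nil (pvMySplit_ne_nil r)
    by_cases hc : c = ' '
    · subst hc
      have hsp : pvIsletter ' ' = false := by decide
      have hh : pvHeadB r = pvHeadB t := by
        have := pvHeadB_mySplit r; rw [ht] at this; simpa using this.symm
      rw [show pvMySplit (' ' :: r) = [] :: pvMySplit r from by simp [pvMySplit], ht]
      have hrec : pvLoopA false r = pvF false (t :: ts) := by rw [ih false, ht]
      show (if (' ' == ' ') && b && pvHeadB r then ' ' :: pvLoopA false r
            else if (' ' != ' ') then ' ' :: pvLoopA (pvIsletter ' ') r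
            else pvLoopA (pvIsletter ' ') r)
          = pvF b ([] :: t :: ts)
      have hF : pvF b ([] :: t :: ts)
          = (if b && pvHeadB t then [' '] else []) ++ pvF false (t :: ts) := by
        simp [pvF, pvEndB]
      rw [hF, hh]
      cases hb : b && pvHeadB t <;> simp [hb, hsp] <;> exact hrec
    · rw [show pvMySplit (c :: r) = match pvMySplit r with
            | [] => [[c]] | t :: ts => (c :: t) :: ts from by simp [pvMySplit, hc], ht]
      have hrec : pvLoopA (pvIsletter c) r = pvF (pvLetter c) (t :: ts) := by
        rw [ih (pvIsletter c), ht, pvLetter_eq]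
      simp only [hc, bne_iff_ne, ne_eq, not_false_iff]
      rw [show (c == ' ' && b && pvHeadB r) = false from by simp [hc]]
      simp only [Bool.false_eq_true, if_false]
      cases ts with
      | nil => simp [pvF] at hrec ⊢; rw [hrec]
      | cons q qs =>
        rw [hrec]
        simp [pvF, pvEndB_cons]

-- no-space inputs are a single token
theorem pvMySplit_no_space (cs : List Char) (h : ' ' ∉ cs) : pvMySplit cs = [cs] := by
  induction cs with
  | nil => simp [pvMySplit]
  | cons c r ih =>
    have hc : c ≠ ' ' := fun hce => h (hce ▸ List.mem_cons_self ..)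
    rw [show pvMySplit (c :: r) = match pvMySplit r with
          | [] => [[c]] | t :: ts => (c :: t) :: ts from by simp [pvMySplit, hc]]
    rw [ih (fun hm => h (List.mem_cons_of_mem _ hm))]

-- B-side bookkeeping
def pvJoinRes (res : List String) : List Char := (res.map String.toList).flatten

theorem pvPyGet_neg_one (l : List Char) : PySem.List.pyGet? l (-1) = l.getLast? := by
  cases l with
  | nil => rfl
  | cons c cs => simp [PySem.List.pyGet?, PySem.List.pyIdx?, List.getLast?_eq_getElem?]

theorem pvPyGet_zero (l : List Char) : PySem.List.pyGet? l 0 = l.head? := by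
  cases l <;> simp [PySem.List.pyGet?, PySem.List.pyIdx?]

theorem pvNe_empty (s : String) : (s != "") = !s.toList.isEmpty := by
  by_cases h : s = ""
  · subst h; simp
  · have : s.toList ≠ [] := fun hl => h (String.toList_inj.mp (by simpa using hl))
    have h1 : (s != "") = true := by simp [h]
    have h2 : s.toList.isEmpty = false := by simp [this]
    rw [h1, h2]; rfl

theorem pvOk_eq (prev p : String) :
    pvOk prev p = (pvEndB false prev.toList && pvHeadB p.toList) := by
  unfold pvOk
  rw [PySem.Str.pyGet?_eq, PySem.Str.pyGet?_eq]
  simp only [PySem.Chars.pyGet?_eq_listPyGet?, pvPyGet_neg_one, pvPyGet_zero,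
    pvNe_empty]
  cases hp : prev.toList with
  | nil => simp [pvEndB]
  | cons a as =>
    cases hq : p.toList with
    | nil => simp [pvEndB, pvHeadB]
    | cons b bs =>
      simp [pvEndB, pvHeadB]

theorem pvFold_spec : ∀ (ts : List String) (prev : String) (acc : List String),
    pvJoinRes (((prev :: ts).zip ts).foldl pvStepB acc)
      = pvJoinRes acc ++ pvGo prev.toList (ts.map String.toList) := by
  intro ts
  induction ts with
  | nil => intro prev acc; simp [pvGo]
  | cons q qs ih =>
    intro prev acc
    rw [show (prev :: q :: qs).zip (q :: qs) = (prev, q) :: (q :: qs).zip qs from rfl]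
    rw [List.foldl_cons, ih q (pvStepB acc (prev, q))]
    have hstep : pvJoinRes (pvStepB acc (prev, q))
        = pvJoinRes acc ++ (if pvOk prev q then [' '] else []) ++ q.toList := by
      unfold pvStepB pvJoinRes
      cases h : pvOk prev q <;> simp
    rw [hstep, pvOk_eq]
    simp [pvGo, List.append_assoc]

theorem pvF_eq_go (ts : List (List Char)) : ∀ t, pvF false (t :: ts) = t ++ pvGo t ts := by
  induction ts with
  | nil => intro t; simp [pvF, pvGo]
  | cons q qs ih =>
    intro t
    rw [show pvF false (t :: q :: qs)
          = t ++ (if pvEndB false t && pvHeadB q then [' '] else []) ++ pvF false (q :: qs) from rfl]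
    rw [ih q]
    simp [pvGo, List.append_assoc]

theorem pvAlt_toList (title : String) :
    (normalize_space_alt title).toList = pvF false (pvMySplit title.toList) := by
  obtain ⟨t, ts, ht⟩ := List.exists_cons_of_ne_nil (pvMySplit_ne_nil title.toList)
  unfold normalize_space_alt
  have hparts : (PySem.Str.split? title " ").getD []
      = (pvMySplit title.toList).map String.ofList := by
    unfold PySem.Str.split? PySem.Chars.split?
    rw [show (" " : String).toList = [' '] from rfl]
    simp [pvSplitOn_eq]
  rw [hparts, ht]
  simp only [List.map_cons, List.headD_cons, List.drop_succ_cons, List.drop_zero]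
  rw [PySem.Str.toList_join]
  have hjoin : ∀ (res : List String),
      PySem.Chars.join (("" : String).toList) (res.map String.toList) = pvJoinRes res := by
    intro res
    unfold PySem.Chars.join pvJoinRes
    rw [show ("" : String).toList = [] from rfl]
    induction res.map String.toList with
    | nil => simp [List.intercalate]
    | cons x xs ihx =>
      cases xs with
      | nil => simp [List.intercalate]
      | cons y ys =>
        simp [List.intercalate] at ihx ⊢
        simpa using ihx
  rw [hjoin]
  rw [pvFold_spec (ts.map String.ofList) (String.ofList t) [String.ofList t]]
  rw [pvF_eq_go ts t]
  simp [pvJoinRes, List.map_map, Function.comp_def]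

-- the fast path: no space means a single token, returned unchanged
theorem pvNoSpace_F (cs : List Char) (h : ' ' ∉ cs) : pvF false (pvMySplit cs) = cs := by
  rw [pvMySplit_no_space cs h]; rfl

-- ===== VERDICT (by name: the statement is the Claim_ definition above) =====
theorem normalize_space_spec : Claim_equal_normalize_space := by
  intro title _
  show normalize_space title = normalize_space_alt title
  apply String.toList_inj.mp
  rw [pvAlt_toList]
  unfold normalize_space
  split_ifs with h
  · -- " " does not occur in title
    have hfind : PySem.Str.find title " " = -1 := by
      have := PySem.Chars.neg_one_le_find (s := title.toList) (sub := (" " : String).toList)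
      simp only [PySem.Str.find_eq] at h ⊢
      omega
    have hnin : ¬ ((" " : String).toList <:+: title.toList) :=
      (PySem.Str.find_eq_neg_one_iff _ _).mp hfind
    have hmem : ' ' ∉ title.toList := by
      intro hm
      exact hnin (by
        obtain ⟨l1, l2, hsplit⟩ := List.append_of_mem hm
        exact ⟨l1, l2, by simp [hsplit]⟩)
    rw [pvNoSpace_F _ hmem]
  · rw [String.toList_ofList, pvLoopA_eq_F]
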